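-- pv_equiv track=rewrite | github.com/noant/spawn-cli | src/spawn_cli/ide/_helpers.py | _partition_ignore_block
-- ===== SOURCE A (Python) =====
-- IGNORE_BLOCK_START = "# spawn:start"
--
-- IGNORE_BLOCK_END = "# spawn:end"
--
-- def _partition_ignore_block(lines: list[str]) -> tuple[list[str], list[str], list[str]]:
--     start_idx: int | None = None
--     end_idx: int | None = None
--     for i, ln in enumerate(lines):
--         if ln.strip() == IGNORE_BLOCK_START:
--             start_idx = i
--             break
--     if start_idx is None:
--         return lines[:], [], []
--     for j in range(start_idx + 1, len(lines)):
--         if lines[j].strip() == IGNORE_BLOCK_END: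
--             end_idx = j
--             break
--     if end_idx is None:
--         return lines[:start_idx], lines[start_idx + 1 :], []
--     return lines[:start_idx], lines[start_idx + 1 : end_idx], lines[end_idx + 1 :]
-- ===== SOURCE B (Python) =====
-- IGNORE_BLOCK_START = "# spawn:start"
--
-- IGNORE_BLOCK_END = "# spawn:end"
--
--
-- def _partition_ignore_block(lines: list[str]) -> tuple[list[str], list[str], list[str]]:
--     before: list[str] = []
--     inside: list[str] = []
--     after: list[str] = []
--     phase = 0  # 0 = before the start marker, 1 = inside the block, 2 = after the end marker
--     for ln in lines:
--         s = ln.strip()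
--         if phase == 0 and s == IGNORE_BLOCK_START:
--             phase = 1
--         elif phase == 1 and s == IGNORE_BLOCK_END:
--             phase = 2
--         elif phase == 0:
--             before.append(ln)
--         elif phase == 1:
--             inside.append(ln)
--         else:
--             after.append(ln)
--     return before, inside, after
-- ===== Notes on version B (the rewrite author's own statement) =====
-- stated objective: alternative
-- what changed: Replaced A's two index-hunting scans plus three slice expressions with a single pass over the lines driven by a phase variable (before/inside/after) that appends each line to the current phase's accumulator and skips the marker lines on the phase transitions.
import Mathlib
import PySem

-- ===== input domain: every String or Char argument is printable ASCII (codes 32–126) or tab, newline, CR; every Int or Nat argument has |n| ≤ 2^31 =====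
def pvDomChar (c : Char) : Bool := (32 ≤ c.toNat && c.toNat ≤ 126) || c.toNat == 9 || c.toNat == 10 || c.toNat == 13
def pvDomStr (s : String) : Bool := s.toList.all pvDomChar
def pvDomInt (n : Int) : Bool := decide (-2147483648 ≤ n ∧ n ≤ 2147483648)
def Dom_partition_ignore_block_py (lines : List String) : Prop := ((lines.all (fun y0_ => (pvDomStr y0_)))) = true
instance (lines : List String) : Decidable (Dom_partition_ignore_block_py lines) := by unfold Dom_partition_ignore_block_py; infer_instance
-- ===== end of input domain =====

-- B replaces A's two index searches + slicing by one pass with a phase variable and three accumulators (alternative decomposition, same cost).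

-- ===== PORT A =====
def pvStart : String := "# spawn:start"
def pvEnd : String := "# spawn:end"

-- first loop: for i, ln in enumerate(lines): if ln.strip() == IGNORE_BLOCK_START: start_idx = i; break
def pvFindStart : List (Int × String) → Option Int
  | [] => none
  | (i, ln) :: rest =>
      if PySem.Str.strip ln == pvStart then some i else pvFindStart rest

-- second loop: for j in range(start_idx + 1, len(lines)): if lines[j].strip() == IGNORE_BLOCK_END: end_idx = j; break
def pvFindEnd (lines : List String) : List Int → Option Int
  | [] => none
  | j :: rest =>
      if PySem.Str.strip (PySem.List.pyGetD lines j "") == pvEnd then some j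
      else pvFindEnd lines rest

def partition_ignore_block_py (lines : List String) : List String × List String × List String :=
  match pvFindStart (PySem.List.enumerate lines 0) with
  | none => (lines, [], [])
  | some s =>
    match pvFindEnd lines (PySem.List.pyRange (s + 1) (lines.length : Int) 1) with
    | none => (PySem.List.slice lines none (some s), PySem.List.slice lines (some (s + 1)) none, [])
    | some e =>
        (PySem.List.slice lines none (some s),
         PySem.List.slice lines (some (s + 1)) (some e),
         PySem.List.slice lines (some (e + 1)) none)

-- ===== PORT B =====
-- one step of Source B's for-loop: state = (phase, before, inside, after)
def pvStep (st : Int × List String × List String × List String) (ln : String) :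
    Int × List String × List String × List String :=
  let (phase, before, inside, after) := st
  let s := PySem.Str.strip ln
  if phase == 0 && s == pvStart then (1, before, inside, after)
  else if phase == 1 && s == pvEnd then (2, before, inside, after)
  else if phase == 0 then (phase, before ++ [ln], inside, after)
  else if phase == 1 then (phase, before, inside ++ [ln], after)
  else (phase, before, inside, after ++ [ln])

def partition_ignore_block_py_alt (lines : List String) : List String × List String × List String :=
  (lines.foldl pvStep (0, [], [], [])).2

-- ===== PRECONDITION & SPEC =====
def Spec_partition_ignore_block_py (lines : List String) (out : List String × List String × List String) : Prop := out = partition_ignore_block_py_alt lines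
instance (lines : List String) (out : List String × List String × List String) : Decidable (Spec_partition_ignore_block_py lines out) := by unfold Spec_partition_ignore_block_py; infer_instance

-- ===== CLAIM (what is proved, stated in full; the proofs are below) =====
def Claim_equal_partition_ignore_block_py : Prop := ∀ (lines : List String), Dom_partition_ignore_block_py lines → Spec_partition_ignore_block_py lines (partition_ignore_block_py lines)

-- ===== LEMMAS AND PROOFS =====

-- Bool predicates under which takeWhile/dropWhile describe both programs
def pvNotStart (l : String) : Bool := !(PySem.Str.strip l == pvStart)
def pvNotEnd (l : String) : Bool := !(PySem.Str.strip l == pvEnd)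

-- B's loop in phase 2 appends everything to `after`
theorem pvFoldl_phase2 (ls : List String) (b i a : List String) :
    List.foldl pvStep (2, b, i, a) ls = (2, b, i, a ++ ls) := by
  induction ls generalizing a with
  | nil => simp
  | cons l ls ih =>
      simp only [List.foldl_cons, pvStep]
      norm_num
      rw [ih]
      simp

-- B's loop in phase 1: fills `inside` until the end marker, then `after`
theorem pvFoldl_phase1 (ls : List String) (b i : List String) :
    List.foldl pvStep (1, b, i, []) ls =
      match ls.dropWhile pvNotEnd with
      | [] => (1, b, i ++ ls, [])
      | _ :: rest => (2, b, i ++ ls.takeWhile pvNotEnd, rest) := by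
  induction ls generalizing i with
  | nil => simp
  | cons l ls ih =>
      by_cases h : pvNotEnd l = true
      · have hne : (PySem.Str.strip l == pvEnd) = false := by
          simpa [pvNotEnd] using h
        rw [List.dropWhile_cons_of_pos h, List.takeWhile_cons_of_pos h]
        simp only [List.foldl_cons, pvStep]
        rw [hne]
        norm_num
        rw [ih (i ++ [l])]
        cases ls.dropWhile pvNotEnd <;> simp
      · have he : (PySem.Str.strip l == pvEnd) = true := by
          simpa [pvNotEnd] using h
        rw [List.dropWhile_cons_of_neg h, List.takeWhile_cons_of_neg h]
        simp only [List.foldl_cons, pvStep]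
        rw [he]
        norm_num
        rw [pvFoldl_phase2]
        simp

-- B's loop from the initial state, fully characterised by takeWhile/dropWhile
theorem pvFoldl_phase0 (ls : List String) (b : List String) :
    List.foldl pvStep (0, b, [], []) ls =
      match ls.dropWhile pvNotStart with
      | [] => (0, b ++ ls, [], [])
      | _ :: rest =>
          match rest.dropWhile pvNotEnd with
          | [] => (1, b ++ ls.takeWhile pvNotStart, rest, [])
          | _ :: rest2 => (2, b ++ ls.takeWhile pvNotStart, rest.takeWhile pvNotEnd, rest2) := by
  induction ls generalizing b with
  | nil => simp
  | cons l ls ih =>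
      by_cases h : pvNotStart l = true
      · have hns : (PySem.Str.strip l == pvStart) = false := by
          simpa [pvNotStart] using h
        rw [List.dropWhile_cons_of_pos h, List.takeWhile_cons_of_pos h]
        simp only [List.foldl_cons, pvStep]
        rw [hns]
        norm_num
        rw [ih (b ++ [l])]
        cases hds : ls.dropWhile pvNotStart with
        | nil => simp
        | cons x rest => cases rest.dropWhile pvNotEnd <;> simp
      · have hs : (PySem.Str.strip l == pvStart) = true := by
          simpa [pvNotStart] using h
        rw [List.dropWhile_cons_of_neg h, List.takeWhile_cons_of_neg h]
        simp only [List.foldl_cons, pvStep]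
        rw [hs]
        norm_num
        rw [pvFoldl_phase1]
        cases ls.dropWhile pvNotEnd <;> simp

-- A's first loop finds the first start-marker index
theorem pvFindStart_eq (ls : List String) (k : Int) :
    pvFindStart (PySem.List.enumerate ls k) =
      match ls.dropWhile pvNotStart with
      | [] => none
      | _ :: _ => some (k + ((ls.takeWhile pvNotStart).length : Int)) := by
  induction ls generalizing k with
  | nil => simp [pvFindStart]
  | cons l ls ih =>
      rw [PySem.List.enumerate_cons]
      by_cases h : pvNotStart l = true
      · have hns : (PySem.Str.strip l == pvStart) = false := by
          simpa [pvNotStart] using h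
        rw [List.dropWhile_cons_of_pos h, List.takeWhile_cons_of_pos h]
        simp only [pvFindStart, hns]
        rw [ih (k + 1)]
        cases ls.dropWhile pvNotStart with
        | nil => simp
        | cons x rest =>
            simp only [List.length_cons]
            push_cast
            ring_nf
      · have hs : (PySem.Str.strip l == pvStart) = true := by
          simpa [pvNotStart] using h
        rw [List.dropWhile_cons_of_neg h, List.takeWhile_cons_of_neg h]
        simp [pvFindStart, hs]

-- A's second loop finds the first end-marker index at or after position j
theorem pvFindEnd_eq (lines : List String) (fuel : Nat) :
    ∀ (j : Nat), lines.length - j ≤ fuel → j ≤ lines.length →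
    pvFindEnd lines (PySem.List.pyRange (j : Int) (lines.length : Int) 1) =
      match (lines.drop j).dropWhile pvNotEnd with
      | [] => none
      | _ :: _ => some (((j + ((lines.drop j).takeWhile pvNotEnd).length : Nat) : Int)) := by
  induction fuel with
  | zero =>
      intro j hf hj
      have hj' : j = lines.length := by omega
      subst hj'
      rw [PySem.List.pyRange_one_eq_nil (le_refl _)]
      simp [pvFindEnd]
  | succ fuel ih =>
      intro j hf hj
      rcases Nat.eq_or_lt_of_le hj with hj' | hlt
      · subst hj'
        rw [PySem.List.pyRange_one_eq_nil (le_refl _)]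
        simp [pvFindEnd]
      · rw [PySem.List.pyRange_one_cons (by exact_mod_cast hlt)]
        have hdrop : lines.drop j = lines[j] :: lines.drop (j + 1) :=
          List.drop_eq_getElem_cons hlt
        have hget : PySem.List.pyGetD lines (j : Int) "" = lines[j] := by
          rw [PySem.List.pyGetD_natCast, List.getD_eq_getElem _ _ hlt]
        by_cases h : pvNotEnd lines[j] = true
        · have hne : (PySem.Str.strip lines[j] == pvEnd) = false := by
            simpa [pvNotEnd] using h
          simp only [pvFindEnd, hget, hne]
          norm_num
          have : ((j : Int) + 1) = ((j + 1 : Nat) : Int) := by push_cast; ring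
          rw [this, ih (j + 1) (by omega) (by omega)]
          rw [hdrop, List.dropWhile_cons_of_pos h, List.takeWhile_cons_of_pos h]
          cases (lines.drop (j + 1)).dropWhile pvNotEnd with
          | nil => simp
          | cons y rest2 =>
              simp only [List.length_cons]
              congr 1
              push_cast
              ring
        · have he : (PySem.Str.strip lines[j] == pvEnd) = true := by
            simpa [pvNotEnd] using h
          simp only [pvFindEnd, hget, he]
          rw [hdrop, List.dropWhile_cons_of_neg h, List.takeWhile_cons_of_neg h]
          simp

-- ===== VERDICT (by name: the statement is the Claim_ definition above) =====
theorem partition_ignore_block_py_spec : Claim_equal_partition_ignore_block_py := by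
  unfold Claim_equal_partition_ignore_block_py
  intro lines _
  unfold Spec_partition_ignore_block_py partition_ignore_block_py partition_ignore_block_py_alt
  rw [pvFindStart_eq lines 0, pvFoldl_phase0]
  cases hds : lines.dropWhile pvNotStart with
  | nil => simp
  | cons x rest =>
      dsimp only
      have hsplit : lines.takeWhile pvNotStart ++ lines.dropWhile pvNotStart = lines :=
        List.takeWhile_append_dropWhile
      have htake := List.take_left (l₁ := lines.takeWhile pvNotStart) (l₂ := lines.dropWhile pvNotStart)
      rw [hsplit] at htake
      have hdropn := List.drop_left (l₁ := lines.takeWhile pvNotStart) (l₂ := lines.dropWhile pvNotStart)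
      rw [hsplit, hds] at hdropn
      have hlen : lines.length = (lines.takeWhile pvNotStart).length + rest.length + 1 := by
        conv_lhs => rw [← hsplit]
        rw [hds]
        simp; omega
      have hdropn1 : lines.drop ((lines.takeWhile pvNotStart).length + 1) = rest := by
        have h2 : (lines.drop (lines.takeWhile pvNotStart).length).drop 1 = rest := by
          rw [hdropn]; simp
        rw [List.drop_drop] at h2
        simpa [Nat.add_comm] using h2
      have hc1 : (0 : Int) + ((lines.takeWhile pvNotStart).length : Int) + 1 =
          (((lines.takeWhile pvNotStart).length + 1 : Nat) : Int) := by push_cast; ring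
      rw [hc1, pvFindEnd_eq lines lines.length ((lines.takeWhile pvNotStart).length + 1)
        (by omega) (by omega), hdropn1]
      cases hde : rest.dropWhile pvNotEnd with
      | nil =>
          dsimp only
          simp only [zero_add]
          rw [PySem.List.slice_to_natCast, PySem.List.slice_from_natCast]
          rw [htake, hdropn1]
          simp
      | cons y rest2 =>
          dsimp only
          have hsplit2 : rest.takeWhile pvNotEnd ++ rest.dropWhile pvNotEnd = rest :=
            List.takeWhile_append_dropWhile
          have htake2 := List.take_left (l₁ := rest.takeWhile pvNotEnd) (l₂ := rest.dropWhile pvNotEnd)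
          rw [hsplit2] at htake2
          have hdropm := List.drop_left (l₁ := rest.takeWhile pvNotEnd) (l₂ := rest.dropWhile pvNotEnd)
          rw [hsplit2, hde] at hdropm
          have hdropm1 : lines.drop ((lines.takeWhile pvNotStart).length + 1 +
              (rest.takeWhile pvNotEnd).length + 1) = rest2 := by
            have h2 : ((lines.drop ((lines.takeWhile pvNotStart).length + 1)).drop
                (rest.takeWhile pvNotEnd).length).drop 1 = rest2 := by
              rw [hdropn1, hdropm]; simp
            rw [List.drop_drop, List.drop_drop] at h2
            rw [show (lines.takeWhile pvNotStart).length + 1 + (rest.takeWhile pvNotEnd).length + 1 =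
              (lines.takeWhile pvNotStart).length + 1 + ((rest.takeWhile pvNotEnd).length + 1) from by omega]
            exact h2
          have hc2 : ((((lines.takeWhile pvNotStart).length + 1 +
              (rest.takeWhile pvNotEnd).length : Nat)) : Int) + 1 =
              (((lines.takeWhile pvNotStart).length + 1 + (rest.takeWhile pvNotEnd).length + 1 : Nat) : Int) := by
            push_cast; ring
          simp only [zero_add]
          rw [hc2, PySem.List.slice_to_natCast,
            PySem.List.slice_natCast, PySem.List.slice_from_natCast]
          rw [htake, hdropn1, hdropm1]
          rw [show (lines.takeWhile pvNotStart).length + 1 + (rest.takeWhile pvNotEnd).length -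
            ((lines.takeWhile pvNotStart).length + 1) = (rest.takeWhile pvNotEnd).length by omega, htake2]
          simp
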